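-- pv_equiv track=rewrite | github.com/vallmeister/Programming | src/leetcode/2838_maximum_coins_heroes_can_collect.py | maximumCoins
-- ===== SOURCE A (Python) =====
-- from typing import List
--
-- def maximumCoins(heroes: List[int], monsters: List[int], coins: List[int]) -> List[int]:
--     monsters = list(sorted(zip(monsters, coins)))
--     heroes = list(sorted(enumerate(heroes), key=lambda x: x[1]))
--     m = len(monsters)
--     n = len(heroes)
--     j = 0
--     ans = [0] * n
--     prev_index = -1
--     for idx, hero in heroes:
--         ans[idx] += ans[prev_index]
--         while j < m and monsters[j][0] <= hero:
--             ans[idx] += monsters[j][1]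
--             j += 1
--         prev_index = idx
--     return ans
-- ===== SOURCE B (Python) =====
-- from typing import List
--
-- def maximumCoins(heroes: List[int], monsters: List[int], coins: List[int]) -> List[int]:
--     # For each hero, directly sum the coins of all monsters it can defeat.
--     return [sum(c for p, c in zip(monsters, coins) if p <= h) for h in heroes]
-- ===== Notes on version B (the rewrite author's own statement) =====
-- stated objective: simpler
-- what changed: Replaced the double sort + two-pointer sweep with prev-index chaining by a direct per-hero sum of coins of monsters with power <= hero, with no sorting or mutable answer array.
import Mathlib
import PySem

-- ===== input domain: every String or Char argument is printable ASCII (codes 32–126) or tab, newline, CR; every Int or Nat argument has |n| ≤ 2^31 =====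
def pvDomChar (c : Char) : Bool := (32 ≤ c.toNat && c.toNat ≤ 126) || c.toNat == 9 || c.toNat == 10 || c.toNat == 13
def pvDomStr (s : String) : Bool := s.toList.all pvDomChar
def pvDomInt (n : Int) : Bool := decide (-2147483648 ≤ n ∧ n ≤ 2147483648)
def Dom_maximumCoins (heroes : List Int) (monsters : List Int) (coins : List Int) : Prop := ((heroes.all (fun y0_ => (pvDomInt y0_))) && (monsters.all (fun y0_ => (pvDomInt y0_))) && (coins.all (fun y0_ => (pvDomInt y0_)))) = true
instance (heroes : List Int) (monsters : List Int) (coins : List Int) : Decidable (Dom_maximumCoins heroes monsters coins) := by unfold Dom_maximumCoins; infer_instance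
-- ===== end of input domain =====

-- B replaces A's double sort + two-pointer sweep with prev-index chaining by a direct
-- per-hero sum of the coins of monsters with power <= hero (simpler; no sorting).


-- ===== PORT A =====
-- the inner 'while j < m and monsters[j][0] <= hero: ans[idx] += monsters[j][1]; j += 1',
-- transcribed over the suffix of the sorted monster list that starts at position j
def pvAWhile (hero : Int) (idx : Int) : List (Int × Int) → List Int → List Int × List (Int × Int)
  | [], ans => (ans, [])
  | (p, c) :: rest, ans =>
      if p ≤ hero then
        pvAWhile hero idx rest (PySem.List.pySetD ans idx (PySem.List.pyGetD ans idx 0 + c))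
      else (ans, (p, c) :: rest)

-- the outer 'for idx, hero in heroes:' loop; the Python indices idx / prev_index are
-- always in range (idx comes from enumerate; prev_index is -1 only while ans is a
-- nonempty all-zero list), so ans[...] is ported with the total pyGetD/pySetD forms
def pvALoop : List (Int × Int) → List Int → List (Int × Int) → Int → List Int
  | [], ans, _, _ => ans
  | (idx, hero) :: hs, ans, rem, prev =>
      let ans1 := PySem.List.pySetD ans idx (PySem.List.pyGetD ans idx 0 + PySem.List.pyGetD ans prev 0)
      let r := pvAWhile hero idx rem ans1
      pvALoop hs r.1 r.2 idx

def maximumCoins (heroes : List Int) (monsters : List Int) (coins : List Int) : List Int :=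
  let ms := PySem.List.sorted2 (List.zip monsters coins) Prod.fst Prod.snd
  let hs := PySem.List.sorted (PySem.List.enumerate heroes) Prod.snd
  let n := hs.length
  let ans := List.replicate n (0 : Int)
  pvALoop hs ans ms (-1)

-- ===== PORT B =====
def maximumCoins_alt (heroes : List Int) (monsters : List Int) (coins : List Int) : List Int :=
  heroes.map (fun h =>
    (((List.zip monsters coins).filter (fun pc => decide (pc.1 ≤ h))).map Prod.snd).sum)

-- ===== PRECONDITION & SPEC =====
def Spec_maximumCoins (heroes : List Int) (monsters : List Int) (coins : List Int) (out : List Int) : Prop := out = maximumCoins_alt heroes monsters coins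
instance (heroes : List Int) (monsters : List Int) (coins : List Int) (out : List Int) : Decidable (Spec_maximumCoins heroes monsters coins out) := by unfold Spec_maximumCoins; infer_instance

-- ===== CLAIM (what is proved, stated in full; the proofs are below) =====
def Claim_equal_maximumCoins : Prop := ∀ (heroes : List Int) (monsters : List Int) (coins : List Int), Dom_maximumCoins heroes monsters coins → Spec_maximumCoins heroes monsters coins (maximumCoins heroes monsters coins)

-- ===== LEMMAS AND PROOFS =====

theorem insertBy_pairwise {α : Type} (before : α → α → Bool) (S : α → α → Prop)
    (h1 : ∀ a b, before a b = true → S a b) (h2 : ∀ a b, before a b = false → S b a)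
    (htr : ∀ a b c, S a b → S b c → S a c) (x : α) :
    ∀ (l : List α), l.Pairwise S → (PySem.List.insertBy before x l).Pairwise S := by
  intro l
  induction l with
  | nil => intro _; simp [PySem.List.insertBy]
  | cons y ys ih =>
    intro hp
    rw [List.pairwise_cons] at hp
    by_cases hb : before x y = true
    · simp only [PySem.List.insertBy, hb, if_true]
      refine List.pairwise_cons.mpr ⟨?_, List.pairwise_cons.mpr hp⟩
      intro a ha
      rcases List.mem_cons.mp ha with rfl | ha
      · exact h1 _ _ hb
      · exact htr _ _ _ (h1 _ _ hb) (hp.1 _ ha)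
    · simp only [PySem.List.insertBy, hb]
      refine List.pairwise_cons.mpr ⟨?_, ih hp.2⟩
      intro a ha
      rcases (PySem.List.mem_insertBy before x a ys).mp ha with rfl | ha
      · exact h2 _ _ (by simpa using hb)
      · exact hp.1 _ ha

theorem foldl_insertBy_pairwise {α : Type} (before : α → α → Bool) (S : α → α → Prop)
    (h1 : ∀ a b, before a b = true → S a b) (h2 : ∀ a b, before a b = false → S b a)
    (htr : ∀ a b c, S a b → S b c → S a c) :
    ∀ (xs acc : List α), acc.Pairwise S →
      (xs.foldl (fun acc x => PySem.List.insertBy before x acc) acc).Pairwise S := by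
  intro xs
  induction xs with
  | nil => intro acc h; simpa using h
  | cons x xs ih =>
    intro acc h
    exact ih _ (insertBy_pairwise before S h1 h2 htr x acc h)

theorem pairwise_fst_sorted2 (xs : List (Int × Int)) :
    (PySem.List.sorted2 xs Prod.fst Prod.snd).Pairwise (fun a b => a.1 ≤ b.1) := by
  have : PySem.List.sorted2 xs Prod.fst Prod.snd =
      xs.foldl (fun acc x => PySem.List.insertBy
        (fun a b => decide (a.1 < b.1) || (!decide (b.1 < a.1) && decide (a.2 < b.2))) x acc) [] := rfl
  rw [this]
  apply foldl_insertBy_pairwise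
  · intro a b hab
    simp only [Bool.or_eq_true, Bool.and_eq_true, Bool.not_eq_eq_eq_not, decide_eq_true_eq] at hab
    rcases hab with h | ⟨h, _⟩
    · omega
    · have : ¬ b.1 < a.1 := by simpa using h
      omega
  · intro a b hab
    have : ¬ a.1 < b.1 := by intro hlt; simp [hlt] at hab
    omega
  · intro a b c h1 h2; omega
  · exact List.Pairwise.nil

theorem takeWhile_filter_sorted (h : Int) :
    ∀ (l : List (Int × Int)), l.Pairwise (fun a b : Int × Int => a.1 ≤ b.1) →
    l.takeWhile (fun pc => decide (pc.1 ≤ h)) = l.filter (fun pc => decide (pc.1 ≤ h)) := by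
  intro l
  induction l with
  | nil => intro _; rfl
  | cons p tl ih =>
    intro hp
    rw [List.pairwise_cons] at hp
    by_cases hph : p.1 ≤ h
    · simp only [List.takeWhile_cons, List.filter_cons, hph, decide_true, if_true, ih hp.2]
    · have hnil : tl.filter (fun pc => decide (pc.1 ≤ h)) = [] := by
        rw [List.filter_eq_nil_iff]
        intro a ha
        simp only [decide_eq_true_eq]
        have := hp.1 a ha
        omega
      simp [hph, hnil]

theorem pvAWhile_eq (hero : Int) (k : Nat) :
    ∀ (rem : List (Int × Int)) (ans : List Int), k < ans.length →
    pvAWhile hero (k : Int) rem ans =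
      (ans.set k (ans.getD k 0 + ((rem.takeWhile (fun pc => decide (pc.1 ≤ hero))).map Prod.snd).sum),
       rem.dropWhile (fun pc => decide (pc.1 ≤ hero))) := by
  intro rem
  induction rem with
  | nil =>
    intro ans hk
    simp only [pvAWhile, List.takeWhile_nil, List.dropWhile_nil, List.map_nil, List.sum_nil,
      add_zero]
    rw [List.getD_eq_getElem ans 0 hk, List.set_getElem_self]
  | cons pc rest ih =>
    intro ans hk
    obtain ⟨p, c⟩ := pc
    by_cases hp : p ≤ hero
    · simp only [pvAWhile, hp, if_true, PySem.List.pySetD_natCast, PySem.List.pyGetD_natCast]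
      rw [ih _ (by simpa using hk)]
      simp only [List.takeWhile_cons, List.dropWhile_cons, hp, decide_true, if_true,
        List.map_cons, List.sum_cons]
      rw [List.set_set]
      congr 1
      have h1 : (ans.set k (ans.getD k 0 + c)).getD k 0 = ans.getD k 0 + c := by
        rw [List.getD_eq_getElem _ 0 (by simpa using hk), List.getElem_set_self,
          List.getD_eq_getElem ans 0 hk]
      rw [h1, List.getD_eq_getElem ans 0 hk, add_assoc]
    · simp only [pvAWhile, hp, if_false]
      simp [hp]
      rw [List.getElem?_eq_getElem hk]
      simp [List.set_getElem_self]

theorem pvALoop_spec (heroes : List Int) (F : Int → Int) :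
    ∀ (hs : List (Int × Int)), ∀ (ans : List Int) (rem : List (Int × Int)) (prev : Int),
    hs.Pairwise (fun a b => a.2 ≤ b.2) →
    (∀ p ∈ hs, ∃ (k : Nat) (hk : k < heroes.length), p = ((k : Int), heroes[k])) →
    (hs.map Prod.fst).Nodup →
    ans.length = heroes.length →
    rem.Pairwise (fun a b : Int × Int => a.1 ≤ b.1) →
    (∀ h ∈ hs.map Prod.snd, F h = PySem.List.pyGetD ans prev 0 +
        ((rem.filter (fun pc => decide (pc.1 ≤ h))).map Prod.snd).sum) →
    (∀ (k : Nat) (hk : k < heroes.length),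
        ans.getD k 0 = if ((k : Int)) ∈ hs.map Prod.fst then 0 else F (heroes[k])) →
    (pvALoop hs ans rem prev).length = heroes.length ∧
    ∀ (k : Nat) (hk : k < heroes.length), (pvALoop hs ans rem prev).getD k 0 = F (heroes[k]) := by
  intro hs
  induction hs with
  | nil =>
    intro ans rem prev _ _ _ hlen _ _ hans
    refine ⟨by simpa [pvALoop] using hlen, ?_⟩
    intro k hk
    have := hans k hk
    simpa [pvALoop] using this
  | cons ph tl ih =>
    intro ans rem prev hsort hmem hnodup hlen hrem hbase hans
    obtain ⟨idx, hero⟩ := ph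
    obtain ⟨k0, hk0, heq⟩ := hmem _ (List.mem_cons_self ..)
    have hidx : idx = (k0 : Int) := by simpa using congrArg Prod.fst heq
    have hhero : hero = heroes[k0] := by simpa using congrArg Prod.snd heq
    subst hidx hhero
    rw [List.pairwise_cons] at hsort
    rw [List.map_cons, List.nodup_cons] at hnodup
    set b := PySem.List.pyGetD ans prev 0 with hb
    have hk0len : k0 < ans.length := by omega
    have hans0 : ans.getD k0 0 = 0 := by
      have := hans k0 hk0
      simpa using this
    show (pvALoop (((k0 : Int), heroes[k0]) :: tl) ans rem prev).length = heroes.length ∧ _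
    simp only [pvALoop, PySem.List.pySetD_natCast, PySem.List.pyGetD_natCast, ← hb]
    rw [hans0, pvAWhile_eq _ _ _ _ (by simpa using hk0len)]
    set T := ((rem.takeWhile (fun pc => decide (pc.1 ≤ heroes[k0]))).map Prod.snd).sum with hT
    have hgd : (ans.set k0 (0 + b)).getD k0 0 = 0 + b := by
      rw [List.getD_eq_getElem _ 0 (by simpa using hk0len), List.getElem_set_self]
    simp only [hgd, List.set_set]
    have hFh : F (heroes[k0]) = b + T := by
      have := hbase (heroes[k0]) (by simp)
      rw [this, hT, takeWhile_filter_sorted _ _ hrem]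
    have hval : 0 + b + T = F (heroes[k0]) := by rw [hFh]; ring
    rw [hval]
    apply ih
    · exact hsort.2
    · intro p hp; exact hmem p (List.mem_cons_of_mem _ hp)
    · exact hnodup.2
    · simpa using hlen
    · exact hrem.sublist (List.dropWhile_sublist _)
    · intro h hh
      have hmemh : h ∈ (((k0 : Int), heroes[k0]) :: tl).map Prod.snd := by
        simp only [List.map_cons]; exact List.mem_cons_of_mem _ hh
      have hFh2 := hbase h hmemh
      have hget : PySem.List.pyGetD (ans.set k0 (F (heroes[k0]))) ((k0 : Int)) 0 = F (heroes[k0]) := by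
        rw [PySem.List.pyGetD_natCast, List.getD_eq_getElem _ 0 (by simpa using hk0len),
          List.getElem_set_self]
      rw [hget]
      obtain ⟨j, hjtl⟩ : ∃ p ∈ tl, p.2 = h := by
        simpa [List.mem_map] using hh
      have hle : heroes[k0] ≤ h := by
        rcases hjtl with ⟨hj, rfl⟩
        exact hsort.1 _ hj
      have hsplit : rem.filter (fun pc => decide (pc.1 ≤ h)) =
          rem.takeWhile (fun pc => decide (pc.1 ≤ heroes[k0])) ++
          (rem.dropWhile (fun pc => decide (pc.1 ≤ heroes[k0]))).filter (fun pc => decide (pc.1 ≤ h)) := by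
        conv_lhs => rw [← List.takeWhile_append_dropWhile
          (p := fun pc : Int × Int => decide (pc.1 ≤ heroes[k0])) (l := rem)]
        rw [List.filter_append]
        congr 1
        rw [List.filter_eq_self]
        intro a ha
        have := List.mem_takeWhile_imp ha
        simp only [decide_eq_true_eq] at this ⊢
        omega
      rw [hFh2, hsplit]
      simp only [List.map_append, List.sum_append]
      rw [hFh]
      ring
    · intro k hk
      by_cases hkk : k = k0
      · subst hkk
        have hnotin : ((k : Int)) ∉ tl.map Prod.fst := hnodup.1
        rw [List.getD_eq_getElem _ 0 (by simpa using hk0len), List.getElem_set_self, if_neg hnotin]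
      · have hget : (ans.set k0 (F (heroes[k0]))).getD k 0 = ans.getD k 0 := by
          rw [List.getD_eq_getElem _ 0 (by simpa using (by omega : k < ans.length)),
            List.getElem_set_ne (by omega), ← List.getD_eq_getElem ans 0 (by omega)]
        rw [hget, hans k hk]
        have hne : ((k : Int)) ≠ ((k0 : Int)) := by exact_mod_cast hkk
        by_cases hmem2 : ((k : Int)) ∈ tl.map Prod.fst
        · rw [if_pos hmem2, if_pos (by simp [hmem2])]
        · rw [if_neg hmem2, if_neg (by simp [hne, hmem2])]

-- ===== VERDICT (by name: the statement is the Claim_ definition above) =====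
theorem maximumCoins_spec : Claim_equal_maximumCoins := by
  intro heroes monsters coins _
  unfold Spec_maximumCoins maximumCoins maximumCoins_alt
  set ms := PySem.List.sorted2 (List.zip monsters coins) Prod.fst Prod.snd with hms
  set hsl := PySem.List.sorted (PySem.List.enumerate heroes) Prod.snd with hhsl
  set F : Int → Int := fun h => ((ms.filter (fun pc => decide (pc.1 ≤ h))).map Prod.snd).sum with hF
  have hlenhsl : hsl.length = heroes.length := by
    rw [hhsl, PySem.List.length_sorted, PySem.List.length_enumerate]
  have hpermfst : (hsl.map Prod.fst).Perm (PySem.List.pyRange 0 (0 + heroes.length) 1) := by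
    rw [← PySem.List.map_fst_enumerate heroes 0]
    exact (PySem.List.sorted_perm (PySem.List.enumerate heroes) Prod.snd false).map Prod.fst
  obtain ⟨hlen, hget⟩ := pvALoop_spec heroes F hsl (List.replicate hsl.length 0) ms (-1)
    (PySem.List.sorted_pairwise (PySem.List.enumerate heroes) Prod.snd)
    (by
      intro p hp
      rw [hhsl, PySem.List.mem_sorted] at hp
      obtain ⟨k, hk, rfl⟩ := (PySem.List.mem_enumerate_iff heroes 0 p).mp hp
      exact ⟨k, hk, by simp⟩)
    (hpermfst.nodup_iff.mpr (PySem.List.nodup_pyRange_one _ _))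
    (by simp [hlenhsl])
    (pairwise_fst_sorted2 _)
    (by
      intro h hh
      have hne : hsl ≠ [] := by
        intro hnil
        rw [hnil] at hh
        simp at hh
      have hlp : hsl.length ≠ 0 := fun h0 => hne (List.length_eq_zero_iff.mp h0)
      have hrepne : List.replicate hsl.length (0 : Int) ≠ [] := by
        simp only [ne_eq, List.replicate_eq_nil_iff]
        exact hlp
      rw [PySem.List.pyGetD_neg_one (List.replicate hsl.length (0 : Int)) 0 hrepne]
      have : (List.replicate hsl.length (0 : Int)).getLast hrepne = 0 :=
        List.eq_of_mem_replicate (List.getLast_mem hrepne)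
      rw [this, zero_add])
    (by
      intro k hk
      have hmemk : ((k : Int)) ∈ hsl.map Prod.fst := by
        rw [hpermfst.mem_iff, PySem.List.mem_pyRange_one]
        constructor
        · exact_mod_cast Nat.zero_le k
        · omega
      simp [hmemk])
  refine List.ext_getElem (by simp [hlen]) ?_
  intro k hk1 hk2
  have hkh : k < heroes.length := by simpa using hk2
  have := hget k hkh
  rw [List.getD_eq_getElem _ 0 (by omega)] at this
  rw [this, List.getElem_map]
  have hperm : ms.Perm (List.zip monsters coins) :=
    PySem.List.sorted2_perm (List.zip monsters coins) Prod.fst Prod.snd false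
  exact (List.Perm.map Prod.snd
    (hperm.filter (fun pc => decide (pc.1 ≤ heroes[k])))).sum_eq
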